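-- pv_equiv track=rewrite | github.com/jldmn/flamenco | packages/flamenco/flamenco/utils.py | frame_range_merge
-- ===== SOURCE A (Python) =====
-- def frame_range_merge(frames_list=None):
--     """Given a frames list, merge them and return them as range of frames.
--
--     :type frames_list: list
--     :rtype: str
--
--     :Example:
--     >>> frames = [1, 3, 4, 5, 8]
--     >>> frame_range_merge(frames)
--     '1,3-5,8'
--     """
--     if not frames_list:
--         return ""
--     ranges = []
--     current_frame = start_frame = prev_frame = frames_list[0]
--     n = len(frames_list)
--     for i in range(1, n):
--         current_frame = frames_list[i]
--         if current_frame == prev_frame + 1: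
--             pass
--         else:
--             if start_frame == prev_frame:
--                 ranges.append(str(start_frame))
--             elif start_frame + 1 == prev_frame:
--                 ranges.append(str(start_frame))
--                 ranges.append(str(prev_frame))
--             else:
--                 ranges.append("{0}-{1}".format(start_frame, prev_frame))
--             start_frame = current_frame
--         prev_frame = current_frame
--     if start_frame == current_frame:
--         ranges.append(str(start_frame))
--     elif start_frame + 1 == current_frame:
--         ranges.append(str(start_frame))
--         ranges.append(str(current_frame))
--     else:
--         ranges.append("{0}-{1}".format(start_frame, current_frame))
--     return ",".join(ranges)
-- ===== SOURCE B (Python) =====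
-- def frame_range_merge(frames_list=None):
--     """Two-phase version: collect maximal consecutive runs, then render them."""
--     if not frames_list:
--         return ""
--     runs = []
--     start = end = frames_list[0]
--     for f in frames_list[1:]:
--         if f == end + 1:
--             end = f
--         else:
--             runs.append((start, end))
--             start = end = f
--     runs.append((start, end))
--     pieces = []
--     for s, e in runs:
--         if s == e:
--             pieces.append(str(s))
--         elif s + 1 == e:
--             pieces.append(str(s))
--             pieces.append(str(e))
--         else:
--             pieces.append("{0}-{1}".format(s, e))
--     return ",".join(pieces)
-- ===== Notes on version B (the rewrite author's own statement) =====
-- stated objective: simpler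
-- what changed: B replaces A's single loop that emits output strings inline (tracking start/prev/current and duplicating the three-way emission after the loop) with two plain passes: first collect maximal consecutive runs as (start, end) pairs, then render each run and join.
import Mathlib
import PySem

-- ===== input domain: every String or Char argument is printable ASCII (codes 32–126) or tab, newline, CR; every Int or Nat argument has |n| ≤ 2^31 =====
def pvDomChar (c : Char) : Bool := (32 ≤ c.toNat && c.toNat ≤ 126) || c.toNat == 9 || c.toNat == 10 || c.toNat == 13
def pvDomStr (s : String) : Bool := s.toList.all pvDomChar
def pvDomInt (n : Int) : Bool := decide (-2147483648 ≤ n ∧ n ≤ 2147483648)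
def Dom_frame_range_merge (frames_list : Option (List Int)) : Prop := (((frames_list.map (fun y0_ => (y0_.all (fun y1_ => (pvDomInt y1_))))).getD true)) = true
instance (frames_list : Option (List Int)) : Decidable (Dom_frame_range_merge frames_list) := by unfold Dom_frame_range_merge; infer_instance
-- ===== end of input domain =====

-- B merges consecutive frames in two plain passes (collect runs, then render them) instead of A's
-- single loop with inline emission; objective: simpler decomposition, same O(n) cost.

-- ===== PORT A =====
-- A's three-way emission of the run [s..p] into `ranges`
def pvEmitA (s p : Int) : List String :=
  if s = p then [PySem.Int.toStr s]
  else if s + 1 = p then [PySem.Int.toStr s, PySem.Int.toStr p]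
  else [PySem.Int.toStr s ++ "-" ++ PySem.Int.toStr p]

-- A's loop body; state = (ranges, start_frame, prev_frame, current_frame)
def pvLoopA (st : List String × Int × Int × Int) (c : Int) : List String × Int × Int × Int :=
  if c = st.2.2.1 + 1 then (st.1, st.2.1, c, c)
  else (st.1 ++ pvEmitA st.2.1 st.2.2.1, c, c, c)

-- the `for i in range(1, n)` loop reads frames_list[1..n-1] in order, i.e. folds over the tail
def frame_range_merge (frames_list : Option (List Int)) : String :=
  match frames_list with
  | none => ""
  | some [] => ""
  | some (x :: xs) =>
      let st := xs.foldl pvLoopA ([], x, x, x)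
      PySem.Str.join "," (st.1 ++ pvEmitA st.2.1 st.2.2.2)

-- ===== PORT B =====
-- pass 1 loop body of Source B: state = (runs, start, end)
def pvRunsLoop (st : List (Int × Int) × Int × Int) (f : Int) : List (Int × Int) × Int × Int :=
  if f = st.2.2 + 1 then (st.1, st.2.1, f)
  else (st.1 ++ [(st.2.1, st.2.2)], f, f)

-- pass 2 of Source B: the pieces one run contributes
def pvPiece (r : Int × Int) : List String :=
  if r.1 = r.2 then [PySem.Int.toStr r.1]
  else if r.1 + 1 = r.2 then [PySem.Int.toStr r.1, PySem.Int.toStr r.2]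
  else [PySem.Int.toStr r.1 ++ "-" ++ PySem.Int.toStr r.2]

def frame_range_merge_alt (frames_list : Option (List Int)) : String :=
  match frames_list with
  | none => ""
  | some [] => ""
  | some (x :: xs) =>
      let st := (PySem.List.slice (x :: xs) (some 1) none).foldl pvRunsLoop ([], x, x)
      PySem.Str.join "," ((st.1 ++ [(st.2.1, st.2.2)]).flatMap pvPiece)

-- ===== PRECONDITION & SPEC =====
def Spec_frame_range_merge (frames_list : Option (List Int)) (out : String) : Prop := out = frame_range_merge_alt frames_list
instance (frames_list : Option (List Int)) (out : String) : Decidable (Spec_frame_range_merge frames_list out) := by unfold Spec_frame_range_merge; infer_instance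

-- ===== CLAIM (what is proved, stated in full; the proofs are below) =====
def Claim_equal_frame_range_merge : Prop := ∀ (frames_list : Option (List Int)), Dom_frame_range_merge frames_list → Spec_frame_range_merge frames_list (frame_range_merge frames_list)

-- ===== LEMMAS AND PROOFS =====

-- B's run-collecting fold only ever appends to the accumulated run list
theorem pvRunsLoop_acc (xs : List Int) (rs : List (Int × Int)) (s e : Int) :
    xs.foldl pvRunsLoop (rs, s, e) =
      (rs ++ (xs.foldl pvRunsLoop ([], s, e)).1, (xs.foldl pvRunsLoop ([], s, e)).2) := by
  induction xs generalizing rs s e with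
  | nil => simp
  | cons c xs ih =>
    simp only [List.foldl_cons, pvRunsLoop]
    by_cases h : c = e + 1
    · simp only [h, if_true]
      exact ih rs s (e + 1)
    · simp only [if_neg h, List.nil_append]
      rw [ih (rs ++ [(s, e)]) c c, ih [(s, e)] c c]
      simp

theorem pvEmitA_eq_pvPiece (s p : Int) : pvEmitA s p = pvPiece (s, p) := rfl

-- the heart: A's inline emission equals B's collect-then-render, for any pending run (s, p)
theorem pvLoop_eq (xs : List Int) (acc : List String) (s p : Int) :
    (xs.foldl pvLoopA (acc, s, p, p)).1
      ++ pvEmitA (xs.foldl pvLoopA (acc, s, p, p)).2.1 (xs.foldl pvLoopA (acc, s, p, p)).2.2.2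
    = acc ++ ((xs.foldl pvRunsLoop ([], s, p)).1
        ++ [((xs.foldl pvRunsLoop ([], s, p)).2.1, (xs.foldl pvRunsLoop ([], s, p)).2.2)]).flatMap pvPiece := by
  induction xs generalizing acc s p with
  | nil => simp [pvEmitA_eq_pvPiece]
  | cons c xs ih =>
    simp only [List.foldl_cons, pvLoopA, pvRunsLoop]
    by_cases h : c = p + 1
    · simp only [h, if_true]
      exact ih acc s (p + 1)
    · simp only [if_neg h]
      rw [ih (acc ++ pvEmitA s p) c c, List.nil_append, pvRunsLoop_acc xs [(s, p)] c c]
      simp [pvEmitA_eq_pvPiece]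

-- ===== VERDICT (by name: the statement is the Claim_ definition above) =====
theorem frame_range_merge_spec : Claim_equal_frame_range_merge := by
  intro frames_list _
  unfold Spec_frame_range_merge frame_range_merge frame_range_merge_alt
  match frames_list with
  | none => rfl
  | some [] => rfl
  | some (x :: xs) =>
    simp only [PySem.List.slice_from_one, List.tail_cons]
    exact congrArg (PySem.Str.join ",") (pvLoop_eq xs [] x x)
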